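-- pv_equiv track=rewrite | github.com/YoungwookKang/coding-test | 코드트리/BFS 고대 문명 유적 탐사.py | change_board
-- ===== SOURCE A (Python) =====
-- from copy import deepcopy
--
-- def change_board(board, i, j, degree):
--     # 90
--     temp = deepcopy(board)
--     if degree == 0:
--         for x in range(3):
--             for y in range(3):
--                 temp[y + i][3 - x - 1 + j] = board[x + i][y + j]
--     elif degree == 1:
--         for x in range(3):
--             for y in range(3):
--                 temp[3 - 1 - x + i][3 - 1 - y + j] = board[x + i][y + j]
--     elif degree == 2:
--         for x in range(3):
--             for y in range(3):
--                 temp[3 - 1 - y + i][x + j] = board[x + i][y + j]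
--     return temp
-- ===== SOURCE B (Python) =====
-- def change_board(board, i, j, degree):
--     out = [row[:] for row in board]
--     if degree not in (0, 1, 2):
--         return out
--     sub = [board[i + x][j:j + 3] for x in range(3)]
--     for _ in range(degree + 1):
--         sub = [list(r) for r in zip(*sub[::-1])]
--     for x in range(3):
--         row = board[i + x]
--         out[i + x] = row[:j] + sub[x] + row[j + 3:]
--     return out
-- ===== Notes on version B (the rewrite author's own statement) =====
-- stated objective: simpler
-- what changed: A rotates via three separate hand-written per-cell index-remapping double loops (one per degree); B slices out the 3x3 block once, rotates it (degree+1) times by the uniform reverse+transpose (zip(*sub[::-1])) step, and splices rebuilt rows back with slicing/concatenation.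
-- outside the precondition, e.g. on change_board([[-1, 4, 4], [0, -1, 0]], -1, -2, 0): A returns [[0, 0, 4], [0, 0, -1]], B raises IndexError
import Mathlib
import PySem

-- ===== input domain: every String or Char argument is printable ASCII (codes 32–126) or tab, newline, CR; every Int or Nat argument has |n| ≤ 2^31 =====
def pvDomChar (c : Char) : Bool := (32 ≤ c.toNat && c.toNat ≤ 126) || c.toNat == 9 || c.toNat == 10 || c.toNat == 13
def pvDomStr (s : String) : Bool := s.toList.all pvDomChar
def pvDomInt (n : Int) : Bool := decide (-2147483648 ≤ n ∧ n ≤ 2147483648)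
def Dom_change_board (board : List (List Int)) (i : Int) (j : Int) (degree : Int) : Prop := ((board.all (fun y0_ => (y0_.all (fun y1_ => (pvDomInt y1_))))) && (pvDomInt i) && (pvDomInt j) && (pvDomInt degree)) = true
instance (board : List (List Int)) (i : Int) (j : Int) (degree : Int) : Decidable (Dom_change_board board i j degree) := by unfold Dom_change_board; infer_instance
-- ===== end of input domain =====

-- B replaces A's three hand-written per-cell rotation loops by one uniform pipeline:
-- slice out the 3x3 block, rotate it (degree+1) times by reverse+transpose, and splice
-- rebuilt rows back (objective: simpler).  Return-value equivalence only: A writes into a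
-- deepcopy of its argument, B never mutates; neither mutates the caller's board.


-- ===== PORT A =====
-- board[r][c] (Python indexing; exact under Pre_, where every access is in range)
def pyGet2 (m : List (List Int)) (r c : Int) : Int :=
  PySem.List.pyGetD (PySem.List.pyGetD m r []) c 0
-- temp[r][c] = v (Python item assignment; exact under Pre_, where every access is in range)
def pySet2 (m : List (List Int)) (r c : Int) (v : Int) : List (List Int) :=
  PySem.List.pySetD m r (PySem.List.pySetD (PySem.List.pyGetD m r []) c v)

def change_board (board : List (List Int)) (i : Int) (j : Int) (degree : Int) : List (List Int) :=
  let temp := board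
  if degree = 0 then
    (PySem.List.pyRange 0 3 1).foldl (fun t x =>
      (PySem.List.pyRange 0 3 1).foldl (fun t y =>
        pySet2 t (y + i) (3 - x - 1 + j) (pyGet2 board (x + i) (y + j))) t) temp
  else if degree = 1 then
    (PySem.List.pyRange 0 3 1).foldl (fun t x =>
      (PySem.List.pyRange 0 3 1).foldl (fun t y =>
        pySet2 t (3 - 1 - x + i) (3 - 1 - y + j) (pyGet2 board (x + i) (y + j))) t) temp
  else if degree = 2 then
    (PySem.List.pyRange 0 3 1).foldl (fun t x =>
      (PySem.List.pyRange 0 3 1).foldl (fun t y =>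
        pySet2 t (3 - 1 - y + i) (x + j) (pyGet2 board (x + i) (y + j))) t) temp
  else temp

-- ===== PORT B =====
-- termination helper for pyZipStar (cited by its decreasing_by)
theorem pvTailSumLe : ∀ (l : List (List Int)),
    ((l.map (fun r => r.tail)).map List.length).sum ≤ (l.map List.length).sum := by
  intro l
  induction l with
  | nil => simp
  | cons a t ih =>
    simp only [List.map_cons, List.sum_cons]
    have : a.tail.length ≤ a.length := by cases a <;> simp
    omega

theorem pvZipMeasure (s : List (List Int)) (hs : s ≠ []) (hr : ∀ r ∈ s, r ≠ []) :
    ((s.map (fun r => r.tail)).map List.length).sum < (s.map List.length).sum := by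
  cases s with
  | nil => exact absurd rfl hs
  | cons a t =>
    have ha : a ≠ [] := hr a (by simp)
    have h1 : a.tail.length < a.length := by
      cases a with
      | nil => exact absurd rfl ha
      | cons x xs => simp
    have h2 := pvTailSumLe t
    simp only [List.map_cons, List.sum_cons]
    omega

-- zip(*s) with the tuples turned into lists (Python zip truncates at the shortest row)
def pyZipStar (s : List (List Int)) : List (List Int) :=
  if h : s ≠ [] ∧ ∀ r ∈ s, r ≠ [] then
    (s.map fun r => r.headI) :: pyZipStar (s.map fun r => r.tail)
  else []
termination_by (s.map List.length).sum
decreasing_by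
  simpa using pvZipMeasure s h.1 h.2

def change_board_alt (board : List (List Int)) (i : Int) (j : Int) (degree : Int) : List (List Int) :=
  let out := board
  if ¬ (degree = 0 ∨ degree = 1 ∨ degree = 2) then out
  else
    let sub := (PySem.List.pyRange 0 3 1).map (fun x =>
      PySem.List.slice (PySem.List.pyGetD board (i + x) []) (some j) (some (j + 3)))
    let sub := (PySem.List.pyRange 0 (degree + 1) 1).foldl (fun t _ => pyZipStar t.reverse) sub
    (PySem.List.pyRange 0 3 1).foldl (fun t x =>
      let row := PySem.List.pyGetD board (i + x) []
      PySem.List.pySetD t (i + x)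
        (PySem.List.slice row none (some j) ++ PySem.List.pyGetD sub x [] ++
         PySem.List.slice row (some (j + 3)) none)) out

-- ===== PRECONDITION & SPEC =====
-- For a non-rotating degree (not 0, 1, 2) A touches nothing, so Pre_ admits everything; for a
-- rotating degree Pre_ requires the natural domain: the 3x3 window at nonnegative i, j fully
-- inside the board.  On other windows A raises IndexError or reads/writes through Python's
-- negative-index wraparound (an accident of indexing, outside the task's domain; B may raise).
def Pre_change_board (board : List (List Int)) (i : Int) (j : Int) (degree : Int) : Prop :=
  (degree = 0 ∨ degree = 1 ∨ degree = 2) →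
    (0 ≤ i ∧ 0 ≤ j ∧ i + 3 ≤ (board.length : Int) ∧
     ∀ x ∈ List.range 3, j + 3 ≤ (((board.getD (i.toNat + x) []).length : Int)))
instance (board : List (List Int)) (i : Int) (j : Int) (degree : Int) : Decidable (Pre_change_board board i j degree) := by unfold Pre_change_board; infer_instance

def pvWitness_change_board : List (List Int) × Int × Int × Int :=
  ([[1, 2, 3], [4, 5, 6], [7, 8, 9]], 0, 0, 0)

def Spec_change_board (board : List (List Int)) (i : Int) (j : Int) (degree : Int) (out : List (List Int)) : Prop := out = change_board_alt board i j degree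
instance (board : List (List Int)) (i : Int) (j : Int) (degree : Int) (out : List (List Int)) : Decidable (Spec_change_board board i j degree out) := by unfold Spec_change_board; infer_instance

-- ===== CLAIM (what is proved, stated in full; the proofs are below) =====
def Claim_equal_change_board : Prop := ∀ (board : List (List Int)) (i : Int) (j : Int) (degree : Int), Dom_change_board board i j degree → Pre_change_board board i j degree → Spec_change_board board i j degree (change_board board i j degree)

-- ===== LEMMAS AND PROOFS =====

-- any list with at least n + 3 elements splits as P ++ a :: b :: c :: S with P of length n
theorem pvDecomp3 {α : Type} : ∀ (n : Nat) (xs : List α), n + 3 ≤ xs.length →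
    ∃ (P : List α) (a b c : α) (S : List α), P.length = n ∧ xs = P ++ a :: b :: c :: S := by
  intro n
  induction n with
  | zero =>
    intro xs h
    match xs, h with
    | a :: b :: c :: S, _ => exact ⟨[], a, b, c, S, rfl, rfl⟩
  | succ n ih =>
    intro xs h
    match xs, h with
    | x :: xs', h =>
      obtain ⟨P, a, b, c, S, hP, hx⟩ := ih xs' (by simp at h; omega)
      exact ⟨x :: P, a, b, c, S, by simp [hP], by simp [hx]⟩

theorem pvGetDLen {α : Type} (P : List α) (M : List α) (k : Nat) (d : α) :
    (P ++ M).getD (P.length + k) d = M.getD k d := by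
  induction P with
  | nil => simp
  | cons a t ih => simpa [Nat.succ_add] using ih

theorem pvSetLen {α : Type} (P : List α) (M : List α) (k : Nat) (v : α) :
    (P ++ M).set (P.length + k) v = P ++ M.set k v := by
  induction P with
  | nil => simp
  | cons a t ih => simpa [Nat.succ_add] using ih

theorem pvDropLen {α : Type} (P : List α) (M : List α) (k : Nat) :
    (P ++ M).drop (P.length + k) = M.drop k := by
  induction P with
  | nil => simp
  | cons a t ih => simpa [Nat.succ_add] using ih

-- pyGetD through an append prefix of known length (index forms ↑p, ↑p + 1, ↑p + 2)
theorem pvGetA0 {α : Type} (P M : List α) (p : Nat) (d : α) (h : P.length = p) :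
    PySem.List.pyGetD (P ++ M) (p : Int) d = M.getD 0 d := by
  subst h
  rw [PySem.List.pyGetD_natCast]
  simpa using pvGetDLen P M 0 d

theorem pvGetA1 {α : Type} (P M : List α) (p : Nat) (d : α) (h : P.length = p) :
    PySem.List.pyGetD (P ++ M) ((p : Int) + 1) d = M.getD 1 d := by
  subst h
  have : ((P.length : Int) + 1) = ((P.length + 1 : Nat) : Int) := by push_cast; ring
  rw [this, PySem.List.pyGetD_natCast]
  simpa using pvGetDLen P M 1 d

theorem pvGetA2 {α : Type} (P M : List α) (p : Nat) (d : α) (h : P.length = p) :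
    PySem.List.pyGetD (P ++ M) ((p : Int) + 2) d = M.getD 2 d := by
  subst h
  have : ((P.length : Int) + 2) = ((P.length + 2 : Nat) : Int) := by push_cast; ring
  rw [this, PySem.List.pyGetD_natCast]
  simpa using pvGetDLen P M 2 d

-- pySetD through an append prefix of known length
theorem pvSetA0 {α : Type} (P M : List α) (p : Nat) (v : α) (h : P.length = p) :
    PySem.List.pySetD (P ++ M) (p : Int) v = P ++ M.set 0 v := by
  subst h
  rw [PySem.List.pySetD_natCast]
  simpa using pvSetLen P M 0 v

theorem pvSetA1 {α : Type} (P M : List α) (p : Nat) (v : α) (h : P.length = p) :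
    PySem.List.pySetD (P ++ M) ((p : Int) + 1) v = P ++ M.set 1 v := by
  subst h
  have : ((P.length : Int) + 1) = ((P.length + 1 : Nat) : Int) := by push_cast; ring
  rw [this, PySem.List.pySetD_natCast]
  simpa using pvSetLen P M 1 v

theorem pvSetA2 {α : Type} (P M : List α) (p : Nat) (v : α) (h : P.length = p) :
    PySem.List.pySetD (P ++ M) ((p : Int) + 2) v = P ++ M.set 2 v := by
  subst h
  have : ((P.length : Int) + 2) = ((P.length + 2 : Nat) : Int) := by push_cast; ring
  rw [this, PySem.List.pySetD_natCast]
  simpa using pvSetLen P M 2 v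

-- slices of a row A ++ a :: b :: c :: B around the block columns
theorem pvSlicePref {α : Type} (A M : List α) (q : Nat) (h : A.length = q) :
    PySem.List.slice (A ++ M) none (some (q : Int)) = A := by
  subst h
  rw [PySem.List.slice_to_natCast]
  simp

theorem pvSliceMid {α : Type} (A : List α) (a b c : α) (B : List α) (q : Nat) (h : A.length = q) :
    PySem.List.slice (A ++ a :: b :: c :: B) (some (q : Int)) (some ((q : Int) + 3)) = [a, b, c] := by
  subst h
  have : ((A.length : Int) + 3) = ((A.length + 3 : Nat) : Int) := by push_cast; ring
  rw [this, PySem.List.slice_natCast]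
  have hd : (A ++ a :: b :: c :: B).drop A.length = a :: b :: c :: B := by
    simpa using pvDropLen A (a :: b :: c :: B) 0
  rw [hd]
  simp

theorem pvSliceSuff {α : Type} (A : List α) (a b c : α) (B : List α) (q : Nat) (h : A.length = q) :
    PySem.List.slice (A ++ a :: b :: c :: B) (some ((q : Int) + 3)) none = B := by
  subst h
  have : ((A.length : Int) + 3) = ((A.length + 3 : Nat) : Int) := by push_cast; ring
  rw [this, PySem.List.slice_from_natCast]
  simpa using pvDropLen A (a :: b :: c :: B) 3

-- pyGetD with a small numeral on an explicit list
theorem pvGetI1 {α : Type} (x : α) (M : List α) (d : α) :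
    PySem.List.pyGetD (x :: M) (1 : Int) d = M.getD 0 d := by
  have : ((1 : Int)) = ((1 : Nat) : Int) := by norm_num
  rw [this, PySem.List.pyGetD_natCast]
  rfl

theorem pvGetI2 {α : Type} (x : α) (M : List α) (d : α) :
    PySem.List.pyGetD (x :: M) (2 : Int) d = M.getD 1 d := by
  have : ((2 : Int)) = ((2 : Nat) : Int) := by norm_num
  rw [this, PySem.List.pyGetD_natCast]
  rfl

-- evaluation of pyZipStar on a 3 x 3 block
theorem pvZip3 (a b c d e f g h k : Int) :
    pyZipStar [[a, b, c], [d, e, f], [g, h, k]] = [[a, d, g], [b, e, h], [c, f, k]] := by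
  simp [pyZipStar]

theorem pvRange3 : PySem.List.pyRange 0 3 1 = [0, 1, 2] := by decide
theorem pvRange1 : PySem.List.pyRange 0 1 1 = [0] := by decide
theorem pvRange2 : PySem.List.pyRange 0 2 1 = [0, 1] := by decide

-- commuted-index twins (simp's arithmetic leaves numerals in front)
theorem pvGetA1' {α : Type} (P M : List α) (p : Nat) (d : α) (h : P.length = p) :
    PySem.List.pyGetD (P ++ M) (1 + (p : Int)) d = M.getD 1 d := by
  rw [add_comm]; exact pvGetA1 P M p d h

theorem pvGetA2' {α : Type} (P M : List α) (p : Nat) (d : α) (h : P.length = p) :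
    PySem.List.pyGetD (P ++ M) (2 + (p : Int)) d = M.getD 2 d := by
  rw [add_comm]; exact pvGetA2 P M p d h

theorem pvSetA1' {α : Type} (P M : List α) (p : Nat) (v : α) (h : P.length = p) :
    PySem.List.pySetD (P ++ M) (1 + (p : Int)) v = P ++ M.set 1 v := by
  rw [add_comm]; exact pvSetA1 P M p v h

theorem pvSetA2' {α : Type} (P M : List α) (p : Nat) (v : α) (h : P.length = p) :
    PySem.List.pySetD (P ++ M) (2 + (p : Int)) v = P ++ M.set 2 v := by
  rw [add_comm]; exact pvSetA2 P M p v h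

-- getD / set with small numerals on an explicit cons list
theorem pvC0 {α : Type} (a b c : α) (B : List α) (d : α) : (a :: b :: c :: B).getD 0 d = a := rfl
theorem pvC1 {α : Type} (a b c : α) (B : List α) (d : α) : (a :: b :: c :: B).getD 1 d = b := rfl
theorem pvC2 {α : Type} (a b c : α) (B : List α) (d : α) : (a :: b :: c :: B).getD 2 d = c := rfl
theorem pvS0 {α : Type} (a b c : α) (B : List α) (v : α) : (a :: b :: c :: B).set 0 v = v :: b :: c :: B := rfl
theorem pvS1 {α : Type} (a b c : α) (B : List α) (v : α) : (a :: b :: c :: B).set 1 v = a :: v :: c :: B := rfl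
theorem pvS2 {α : Type} (a b c : α) (B : List α) (v : α) : (a :: b :: c :: B).set 2 v = a :: b :: v :: B := rfl

-- ===== VERDICT (by name: the statement is the Claim_ definition above) =====
theorem change_board_spec : Claim_equal_change_board := by
  intro board i j degree _hD hPre
  unfold Spec_change_board
  by_cases hd : degree = 0 ∨ degree = 1 ∨ degree = 2
  case neg =>
    have h0 : ¬ degree = 0 := fun h => hd (Or.inl h)
    have h1 : ¬ degree = 1 := fun h => hd (Or.inr (Or.inl h))
    have h2 : ¬ degree = 2 := fun h => hd (Or.inr (Or.inr h))
    simp only [change_board, change_board_alt, if_neg h0, if_neg h1, if_neg h2]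
    rw [if_pos hd]
  obtain ⟨hi, hj, hlen, hrows⟩ := hPre hd
  obtain ⟨P, R0, R1, R2, S, hP, hb⟩ := pvDecomp3 i.toNat board (by omega)
  subst hb
  have hl0 := hrows 0 (by decide)
  have hl1 := hrows 1 (by decide)
  have hl2 := hrows 2 (by decide)
  rw [← hP, pvGetDLen] at hl0 hl1 hl2
  simp only [List.getD] at hl0 hl1 hl2
  obtain ⟨A0, a00, a01, a02, B0, hA0, hR0⟩ := pvDecomp3 j.toNat R0 (by simp at hl0 ⊢; omega)
  obtain ⟨A1, a10, a11, a12, B1, hA1, hR1⟩ := pvDecomp3 j.toNat R1 (by simp at hl1 ⊢; omega)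
  obtain ⟨A2, a20, a21, a22, B2, hA2, hR2⟩ := pvDecomp3 j.toNat R2 (by simp at hl2 ⊢; omega)
  subst hR0; subst hR1; subst hR2
  have hi' : i = (P.length : Int) := by omega
  have hj' : j = (A0.length : Int) := by omega
  subst hi'; subst hj'
  have hq1 : A1.length = A0.length := by omega
  have hq2 : A2.length = A0.length := by omega
  rcases hd with h0 | h1 | h2
  · subst h0
    norm_num [change_board, change_board_alt, pvRange3, pvRange1, pvRange2, pySet2, pyGet2,
      List.foldl_cons, List.foldl_nil, pvGetA0, pvGetA1, pvGetA2, pvGetA1', pvGetA2',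
      pvSetA0, pvSetA1, pvSetA2, pvSetA1', pvSetA2', pvSlicePref, pvSliceMid, pvSliceSuff,
      pvGetI1, pvGetI2, pvZip3, pvC0, pvC1, pvC2, pvS0, pvS1, pvS2, hq1, hq2]
  · subst h1
    norm_num [change_board, change_board_alt, pvRange3, pvRange1, pvRange2, pySet2, pyGet2,
      List.foldl_cons, List.foldl_nil, pvGetA0, pvGetA1, pvGetA2, pvGetA1', pvGetA2',
      pvSetA0, pvSetA1, pvSetA2, pvSetA1', pvSetA2', pvSlicePref, pvSliceMid, pvSliceSuff,
      pvGetI1, pvGetI2, pvZip3, pvC0, pvC1, pvC2, pvS0, pvS1, pvS2, hq1, hq2]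
  · subst h2
    norm_num [change_board, change_board_alt, pvRange3, pvRange1, pvRange2, pySet2, pyGet2,
      List.foldl_cons, List.foldl_nil, pvGetA0, pvGetA1, pvGetA2, pvGetA1', pvGetA2',
      pvSetA0, pvSetA1, pvSetA2, pvSetA1', pvSetA2', pvSlicePref, pvSliceMid, pvSliceSuff,
      pvGetI1, pvGetI2, pvZip3, pvC0, pvC1, pvC2, pvS0, pvS1, pvS2, hq1, hq2]
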